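-- pv_equiv track=rewrite | github.com/IgorAllen/Faculdade | segundo_semestre/prova/funcoesss.py | menores_palavaras
-- ===== SOURCE A (Python) =====
-- def menores_palavaras(frase: str):
--     palavras = frase.split(" ")
--     tam_menor = len(palavras[0])
--     menores = []
--
--     for palavra in palavras:
--         if len(palavra) < tam_menor:
--             tam_menor = len(palavra)
--
--     for palavra in palavras:
--         if len(palavra) == tam_menor:
--             menores.append(palavra)
--
--     return menores
-- ===== SOURCE B (Python) =====
-- def menores_palavaras(frase: str):
--     tam_menor = None
--     menores = []
--     for palavra in frase.split(" "):
--         t = len(palavra)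
--         if tam_menor is None or t < tam_menor:
--             tam_menor = t
--             menores = [palavra]
--         elif t == tam_menor:
--             menores.append(palavra)
--     return menores
-- ===== Notes on version B (the rewrite author's own statement) =====
-- stated objective: alternative
-- what changed: A's two passes (find the minimum length, then collect words of that length) are fused into one accumulator-carrying pass that resets the result list whenever a strictly shorter word appears.
import Mathlib
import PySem

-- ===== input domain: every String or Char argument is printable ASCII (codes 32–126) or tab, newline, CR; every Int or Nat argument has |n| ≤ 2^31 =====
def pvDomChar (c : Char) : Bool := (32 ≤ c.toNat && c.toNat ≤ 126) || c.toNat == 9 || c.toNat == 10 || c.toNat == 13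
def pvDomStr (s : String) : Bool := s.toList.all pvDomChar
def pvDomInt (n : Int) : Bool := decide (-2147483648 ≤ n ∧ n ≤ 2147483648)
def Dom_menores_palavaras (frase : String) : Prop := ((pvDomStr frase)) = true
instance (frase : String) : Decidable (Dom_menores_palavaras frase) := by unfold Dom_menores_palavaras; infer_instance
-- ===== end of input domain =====

-- B fuses A's two passes (find min length, then collect) into one accumulator-carrying pass; same values everywhere.

-- ===== PORT A =====
def menores_palavaras (frase : String) : List String :=
  let palavras := ((PySem.Str.split? frase " ").getD [])
  match PySem.List.pyGet? palavras 0 with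
  | none => []   -- unreachable: str.split(" ") never returns an empty list, so palavras[0] never raises
  | some p0 =>
    let tam_menor := palavras.foldl
      (fun t p => if PySem.Str.len p < t then PySem.Str.len p else t) (PySem.Str.len p0)
    palavras.foldl (fun acc p => if PySem.Str.len p == tam_menor then acc ++ [p] else acc) []

-- ===== PORT B =====
def pvAltStep (st : Option Int × List String) (palavra : String) : Option Int × List String :=
  let t := PySem.Str.len palavra
  match st.1 with
  | none => (some t, [palavra])
  | some m =>
    if t < m then (some t, [palavra])
    else if t == m then (some m, st.2 ++ [palavra])
    else st

def menores_palavaras_alt (frase : String) : List String :=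
  ((((PySem.Str.split? frase " ").getD [])).foldl pvAltStep (none, [])).2

-- ===== PRECONDITION & SPEC =====
def Spec_menores_palavaras (frase : String) (out : List String) : Prop := out = menores_palavaras_alt frase
instance (frase : String) (out : List String) : Decidable (Spec_menores_palavaras frase out) := by unfold Spec_menores_palavaras; infer_instance

-- ===== CLAIM (what is proved, stated in full; the proofs are below) =====
def Claim_equal_menores_palavaras : Prop := ∀ (frase : String), Dom_menores_palavaras frase → Spec_menores_palavaras frase (menores_palavaras frase)

-- ===== LEMMAS AND PROOFS =====

def pvMinf (m : Int) (l : List String) : Int :=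
  l.foldl (fun t p => if PySem.Str.len p < t then PySem.Str.len p else t) m

theorem pvMinf_le (l : List String) (m : Int) : pvMinf m l ≤ m := by
  induction l generalizing m with
  | nil => simp [pvMinf]
  | cons w t ih =>
    simp only [pvMinf, List.foldl_cons]
    split_ifs with h
    · exact le_trans (ih _) (le_of_lt h)
    · exact ih m

theorem pvAlt_fold (l : List String) (m : Int) (acc : List String) :
    l.foldl pvAltStep (some m, acc) =
      (some (pvMinf m l),
        (if pvMinf m l = m then acc else []) ++ l.filter (fun p => PySem.Str.len p == pvMinf m l)) := by
  induction l generalizing m acc with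
  | nil => simp [pvMinf]
  | cons w t ih =>
    have hmin : pvMinf m (w :: t) =
        pvMinf (if PySem.Str.len w < m then PySem.Str.len w else m) t := by
      simp [pvMinf]
    by_cases h1 : PySem.Str.len w < m
    · have hM : pvMinf m (w :: t) = pvMinf (PySem.Str.len w) t := by
        rw [hmin, if_pos h1]
      have hne : pvMinf m (w :: t) ≠ m := by
        rw [hM]; exact ne_of_lt (lt_of_le_of_lt (pvMinf_le t _) h1)
      simp only [List.foldl_cons, pvAltStep, h1, if_pos]
      rw [ih]
      rw [hM, List.filter_cons]
      rw [hM] at hne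
      by_cases h2 : pvMinf (PySem.Str.len w) t = PySem.Str.len w
      · rw [if_pos h2, if_neg hne, if_pos (beq_iff_eq.mpr h2.symm)]
        simp
      · rw [if_neg h2, if_neg hne, if_neg (fun e => h2 (beq_iff_eq.mp e).symm)]
    · have hM : pvMinf m (w :: t) = pvMinf m t := by
        rw [hmin, if_neg h1]
      by_cases h2 : PySem.Str.len w = m
      · simp only [List.foldl_cons, pvAltStep]
        rw [if_neg h1, if_pos (beq_iff_eq.mpr h2)]
        rw [ih, hM, List.filter_cons]
        by_cases h3 : pvMinf m t = m
        · simp [h3, beq_iff_eq]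
          exact h2
        · simp [h3, beq_iff_eq]
          exact fun e => h3 (h2.symm.trans e).symm
      · simp only [List.foldl_cons, pvAltStep]
        rw [if_neg h1, if_neg (by simp only [beq_iff_eq]; exact h2)]
        rw [ih, hM, List.filter_cons]
        have hlt : pvMinf m t ≤ m := pvMinf_le t m
        have hx : ¬ PySem.Str.len w = pvMinf m t := by
          intro e
          rcases lt_or_eq_of_le hlt with h | h
          · exact h1 (e ▸ h)
          · exact h2 (e.trans h)
        simp [beq_iff_eq]
        exact hx

theorem pv_generic (l : List String) :
    (match PySem.List.pyGet? l 0 with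
     | none => []
     | some p0 =>
       let tam := pvMinf (PySem.Str.len p0) l
       l.foldl (fun acc p => if PySem.Str.len p == tam then acc ++ [p] else acc) ([] : List String)) =
    (l.foldl pvAltStep (none, [])).2 := by
  cases l with
  | nil => simp [PySem.List.pyGet?, PySem.List.pyIdx?]
  | cons p0 t =>
    have hget : PySem.List.pyGet? (p0 :: t) 0 = some p0 := by
      simp [PySem.List.pyGet?, PySem.List.pyIdx?]
    rw [hget]
    simp only [List.foldl_cons]
    have hstep : pvAltStep (none, []) p0 = (some (PySem.Str.len p0), [p0]) := by
      simp [pvAltStep]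
    rw [hstep, pvAlt_fold]
    have hM : pvMinf (PySem.Str.len p0) (p0 :: t) = pvMinf (PySem.Str.len p0) t := by
      simp [pvMinf]
    rw [hM]
    set M := pvMinf (PySem.Str.len p0) t with hMdef
    have hle : M ≤ PySem.Str.len p0 := pvMinf_le t _
    have hfold := fun acc => PySem.List.foldl_append_if_eq_filter (fun p => PySem.Str.len p == M) t acc
    by_cases h0 : (PySem.Str.len p0 == M) = true
    · have : M = PySem.Str.len p0 := (beq_iff_eq.mp h0).symm
      rw [if_pos h0, if_pos this, hfold]
      simp
    · have : M ≠ PySem.Str.len p0 := fun e => h0 (beq_iff_eq.mpr e.symm)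
      rw [if_neg h0, if_neg this, hfold]

-- ===== VERDICT (by name: the statement is the Claim_ definition above) =====
theorem menores_palavaras_spec : Claim_equal_menores_palavaras := by
  intro frase _
  unfold Spec_menores_palavaras menores_palavaras menores_palavaras_alt
  exact pv_generic (((PySem.Str.split? frase " ").getD []))
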